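-- pv_equiv track=rewrite | github.com/DenisMaksakov/ya_algorithm_training | 2021_1/4_dictionaries_and_counting_sorting/I_code.py | count_errors_in_text
-- ===== SOURCE A (Python) =====
-- from typing import Dict, List
--
-- def has_exactly_one_uppercase(word: str) -> bool:
--     """Проверяет, содержит ли слово ровно одну заглавную букву."""
--     return sum(char.isupper() for char in word) == 1
--
-- def count_errors_in_text(accent_dict: Dict[str, List[str]], text: str) -> int:
--     """
--     Подсчитывает количество ошибок в тексте согласно словарю ударений.
--
--     Args:
--         accent_dict: Словарь ударений
--         text: Текст для проверки
--
--     Returns: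
--         Количество найденных ошибок
--     """
--     error_count = 0
--
--     for word in text.split():
--         lower_word = word.lower()
--
--         if lower_word in accent_dict:
--             # Слово есть в словаре - проверяем правильность ударения
--             if word not in accent_dict[lower_word]:
--                 error_count += 1
--         else:
--             # Слова нет в словаре - проверяем ровно одно ударение
--             if not has_exactly_one_uppercase(word):
--                 error_count += 1
--
--     return error_count
-- ===== SOURCE B (Python) =====
-- def _is_error(accent_dict, word):
--     """Error verdict for one distinct word, computed once per group."""
--     lower_word = word.lower()
--     if lower_word in accent_dict:
--         return word not in accent_dict[lower_word]
--     return sum(1 for c in word if c.isupper()) != 1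
--
-- def count_errors_in_text(accent_dict, text):
--     # Group occurrences first: frequency table over distinct words,
--     # then one verdict per distinct word, weighted by its count.
--     counts = {}
--     for w in text.split():
--         counts[w] = counts.get(w, 0) + 1
--     total = 0
--     for word, n in counts.items():
--         if _is_error(accent_dict, word):
--             total += n
--     return total
-- ===== Notes on version B (the rewrite author's own statement) =====
-- stated objective: alternative
-- what changed: B first builds a frequency table of the words with a dict, then judges each DISTINCT word once and adds its multiplicity to the total, instead of A's re-evaluating the verdict for every occurrence.
import Mathlib
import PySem

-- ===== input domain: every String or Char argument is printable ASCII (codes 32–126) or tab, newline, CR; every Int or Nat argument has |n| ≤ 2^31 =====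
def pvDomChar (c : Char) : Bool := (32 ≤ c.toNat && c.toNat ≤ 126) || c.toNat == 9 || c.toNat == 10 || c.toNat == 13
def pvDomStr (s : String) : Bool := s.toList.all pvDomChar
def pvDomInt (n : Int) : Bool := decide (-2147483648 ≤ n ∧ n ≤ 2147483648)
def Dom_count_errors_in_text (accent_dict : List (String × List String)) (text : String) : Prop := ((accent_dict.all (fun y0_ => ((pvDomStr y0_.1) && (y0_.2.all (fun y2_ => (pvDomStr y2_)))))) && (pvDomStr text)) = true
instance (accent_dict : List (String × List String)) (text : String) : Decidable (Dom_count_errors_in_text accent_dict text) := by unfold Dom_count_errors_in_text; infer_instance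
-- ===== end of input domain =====

-- B groups the words with a frequency table and judges each DISTINCT word once,
-- adding its multiplicity; A re-judges every occurrence. Objective: alternative decomposition.

-- ===== PORT A =====
def has_exactly_one_uppercase (word : String) : Bool :=
  ((word.toList.map (fun c => if PySem.Chars.isupper c then (1 : Int) else 0)).sum) == 1

def count_errors_in_text (accent_dict : List (String × List String)) (text : String) : Int :=
  (PySem.Str.split₀ text).foldl (fun error_count word =>
    let lower_word := PySem.Str.lower word
    match accent_dict.lookup lower_word with
    | some forms => if ¬ (word ∈ forms) then error_count + 1 else error_count
    | none => if ¬ has_exactly_one_uppercase word then error_count + 1 else error_count) 0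

-- ===== PORT B =====
def cet_is_error (accent_dict : List (String × List String)) (word : String) : Bool :=
  let lower_word := PySem.Str.lower word
  match accent_dict.lookup lower_word with
  | some forms => ¬ (word ∈ forms)
  | none => (word.toList.countP PySem.Chars.isupper : Int) ≠ 1

def count_errors_in_text_alt (accent_dict : List (String × List String)) (text : String) : Int :=
  let counts : PySem.Dict String Int :=
    (PySem.Str.split₀ text).foldl (fun d w => d.insert w (d.getD w 0 + 1)) PySem.Dict.empty
  counts.items.foldl (fun total wn =>
    if cet_is_error accent_dict wn.1 then total + wn.2 else total) 0

-- ===== PRECONDITION & SPEC =====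
def Spec_count_errors_in_text (accent_dict : List (String × List String)) (text : String) (out : Int) : Prop := out = count_errors_in_text_alt accent_dict text
instance (accent_dict : List (String × List String)) (text : String) (out : Int) : Decidable (Spec_count_errors_in_text accent_dict text out) := by unfold Spec_count_errors_in_text; infer_instance

-- ===== CLAIM (what is proved, stated in full; the proofs are below) =====
def Claim_equal_count_errors_in_text : Prop := ∀ (accent_dict : List (String × List String)) (text : String), Dom_count_errors_in_text accent_dict text → Spec_count_errors_in_text accent_dict text (count_errors_in_text accent_dict text)

-- ===== LEMMAS AND PROOFS =====

-- A's per-occurrence fold counts exactly the words satisfying cet_is_error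
theorem countA_eq_countP (accent_dict : List (String × List String)) (text : String) :
    count_errors_in_text accent_dict text
      = ((PySem.Str.split₀ text).countP (cet_is_error accent_dict) : Int) := by
  unfold count_errors_in_text
  have hfun : (fun (error_count : Int) (word : String) =>
      let lower_word := PySem.Str.lower word
      match accent_dict.lookup lower_word with
      | some forms => if ¬ (word ∈ forms) then error_count + 1 else error_count
      | none => if ¬ has_exactly_one_uppercase word then error_count + 1 else error_count)
      = (fun acc w => if cet_is_error accent_dict w then acc + 1 else acc) := by
    funext ec w
    unfold cet_is_error has_exactly_one_uppercase
    rcases hl : List.lookup (PySem.Str.lower w) accent_dict with _ | forms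
    · simp only [hl, PySem.List.sum_map_ite_one_zero]
      by_cases h : ((w.toList.countP PySem.Chars.isupper : Int) = 1) <;> simp [h]
    · simp only [hl]
      by_cases h : w ∈ forms <;> simp [h]
  rw [hfun, PySem.List.foldl_if_add_one]
  simp

-- folding 'if p x then t + f x else t' over a list is the sum of f over the filtered list
theorem foldl_if_add (l : List (String × Int)) (p : String × Int → Bool) (a : Int) :
    l.foldl (fun t x => if p x then t + x.2 else t) a
      = a + ((l.filter p).map (·.2)).sum := by
  induction l generalizing a with
  | nil => simp
  | cons x xs ih =>
    by_cases h : p x = true <;> simp [List.foldl, h, ih, add_assoc]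

-- grouped sum of multiplicities over distinct error words = per-occurrence count
theorem sum_counts_eq_countP (ws : List String) (p : String → Bool) :
    (((PySem.Set.ofList ws).filter p).map (fun w => (ws.count w : Int))).sum
      = (ws.countP p : Int) := by
  have hperm : (PySem.Set.ofList ws).Perm ws.dedup := by
    rw [List.perm_ext_iff_of_nodup (PySem.Set.nodup_ofList ws) ws.nodup_dedup]
    intro a
    rw [PySem.Set.mem_ofList, List.mem_dedup]
  have h2 : (((PySem.Set.ofList ws).filter p).map (fun w => (ws.count w : Int))).sum
      = ((ws.dedup.filter p).map (fun w => (ws.count w : Int))).sum :=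
    List.Perm.sum_eq (List.Perm.map _ (List.Perm.filter p hperm))
  rw [h2]
  have h3 := List.sum_map_count_dedup_filter_eq_countP p ws
  calc ((ws.dedup.filter p).map (fun w => (ws.count w : Int))).sum
      = (((ws.dedup.filter p).map (fun w => ws.count w)).map (Nat.cast : Nat → Int)).sum := by
        rw [List.map_map]; rfl
    _ = (ws.countP p : Int) := by rw [← Nat.cast_list_sum, h3]

theorem count_errors_in_text_spec : Claim_equal_count_errors_in_text := by
  intro accent_dict text _
  unfold Spec_count_errors_in_text
  rw [countA_eq_countP]
  unfold count_errors_in_text_alt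
  simp only [PySem.Dict.foldl_insert_getD_add_one_eq_counter, PySem.Dict.items_counter,
    foldl_if_add, List.filter_map, List.map_map, Function.comp_def]
  rw [sum_counts_eq_countP (PySem.Str.split₀ text) (cet_is_error accent_dict)]
  simp
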